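-- pv_equiv track=rewrite | github.com/SchwartzCode/CMU_15-112__Funamentals_of_CS | hw8_spring2019.py | quick4
-- ===== SOURCE A (Python) =====
-- def quick4(a, b):
--     assert(len(a) == len(b))                    # O(1)
--     aMax = a[0]                                 # O(1)
--     aMin = a[0]                                 # O(1)
--     bMax = b[0]                                 # O(1)
--     bMin = b[0]                                 # O(1)
--
--     for i in range(len(a)):                     # O(N)
--         if a[i] > aMax:                             # O(1)
--             aMax = a[i]                             # O(1)
--         elif a[i] < aMin:                           # O(1)
--             aMin = a[i]                             # O(1)
--
--         if b[i] > bMax:                             # O(1)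
--             bMax = b[i]                             # O(1)
--         elif b[i] < bMin:                           # O(1)
--             bMin = b[i]                             # O(1)
--
--     if abs(aMax - bMin) > abs(bMax - aMin):     # O(1)
--         return abs(aMax - bMin)                 # O(1)
--     else:                                       # O(1)
--         return abs(bMax - aMin)                 # O(1)
-- ===== SOURCE B (Python) =====
-- def quick4(a, b):
--     assert(len(a) == len(b))
--     sa = sorted(a)
--     sb = sorted(b)
--     return max(abs(sa[-1] - sb[0]), abs(sb[-1] - sa[0]))
-- ===== Notes on version B (the rewrite author's own statement) =====
-- stated objective: alternative
-- what changed: Replaced the fused running-extremes index loop with sorting both lists and reading the min/max off the endpoints of the sorted copies, then taking max() of the two absolute spreads.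
import Mathlib
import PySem

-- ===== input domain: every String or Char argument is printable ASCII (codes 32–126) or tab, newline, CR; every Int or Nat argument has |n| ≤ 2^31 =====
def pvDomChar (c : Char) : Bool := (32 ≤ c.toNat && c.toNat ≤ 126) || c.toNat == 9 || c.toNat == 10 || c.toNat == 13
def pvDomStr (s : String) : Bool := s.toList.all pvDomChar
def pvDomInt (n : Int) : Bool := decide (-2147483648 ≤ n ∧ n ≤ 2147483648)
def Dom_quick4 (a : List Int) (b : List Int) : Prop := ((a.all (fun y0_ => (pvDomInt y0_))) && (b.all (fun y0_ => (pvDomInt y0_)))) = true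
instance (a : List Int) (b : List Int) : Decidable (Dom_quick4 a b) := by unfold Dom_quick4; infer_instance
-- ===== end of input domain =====

-- B sorts both lists and reads the extremes off the sorted endpoints instead of
-- A's fused running-extremes index loop; an alternative decomposition, not faster.


-- ===== PORT A =====
-- one loop iteration: update the (aMax, aMin) pair with x and the (bMax, bMin) pair with y,
-- in A's branch order (if > max … elif < min …)
def quick4step (s : (Int × Int) × (Int × Int)) (x y : Int) : (Int × Int) × (Int × Int) :=
  (if x > s.1.1 then (x, s.1.2) else if x < s.1.2 then (s.1.1, x) else s.1,
   if y > s.2.1 then (y, s.2.2) else if y < s.2.2 then (s.2.1, y) else s.2)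

def quick4 (a : List Int) (b : List Int) : Int :=
  -- a[0]/b[0]: in range on every input Pre_quick4 admits (a, b nonempty)
  let a0 := PySem.List.pyGetD a 0 0
  let b0 := PySem.List.pyGetD b 0 0
  let s := (PySem.List.pyRange 0 (PySem.List.len a) 1).foldl
      (fun s i => quick4step s (PySem.List.pyGetD a i 0) (PySem.List.pyGetD b i 0))
      ((a0, a0), (b0, b0))
  if |s.1.1 - s.2.2| > |s.2.1 - s.1.2| then |s.1.1 - s.2.2| else |s.2.1 - s.1.2|

-- ===== PORT B =====
def quick4_alt (a : List Int) (b : List Int) : Int :=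
  let sa := PySem.List.sorted a (fun x => x) false
  let sb := PySem.List.sorted b (fun x => x) false
  -- sa[-1], sa[0], …: in range on every input Pre_quick4 admits (a, b nonempty)
  max |PySem.List.pyGetD sa (-1) 0 - PySem.List.pyGetD sb 0 0|
      |PySem.List.pyGetD sb (-1) 0 - PySem.List.pyGetD sa 0 0|

-- ===== PRECONDITION & SPEC =====
-- Pre_ excludes only inputs on which A raises: unequal lengths (AssertionError)
-- and empty lists (IndexError at a[0]); B raises there too (Assertion/IndexError).
def Pre_quick4 (a : List Int) (b : List Int) : Prop := a.length = b.length ∧ a ≠ []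
instance (a : List Int) (b : List Int) : Decidable (Pre_quick4 a b) := by unfold Pre_quick4; infer_instance
def pvWitness_quick4 : List Int × List Int := ([1, 5, -2], [3, 0, 9])
def Spec_quick4 (a : List Int) (b : List Int) (out : Int) : Prop := out = quick4_alt a b
instance (a : List Int) (b : List Int) (out : Int) : Decidable (Spec_quick4 a b out) := by unfold Spec_quick4; infer_instance

-- ===== CLAIM (what is proved, stated in full; the proofs are below) =====
def Claim_equal_quick4 : Prop := ∀ (a : List Int) (b : List Int), Dom_quick4 a b → Pre_quick4 a b → Spec_quick4 a b (quick4 a b)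

-- ===== LEMMAS AND PROOFS =====

-- a product-state fold splits into two independent folds
theorem foldl_prod_split {ι α β : Type} (l : List ι) (f : α → ι → α) (g : β → ι → β)
    (p : α) (q : β) :
    l.foldl (fun s i => (f s.1 i, g s.2 i)) (p, q) = (l.foldl f p, l.foldl g q) := by
  induction l generalizing p q with
  | nil => rfl
  | cons x t ih => simpa using ih (f p x) (g q x)

-- A's elif update, started below an invariant min ≤ max, computes the running max and min
theorem step1_fold (t : List Int) :
    ∀ (M m : Int), m ≤ M →
    t.foldl (fun (p : Int × Int) x =>
        if x > p.1 then (x, p.2) else if x < p.2 then (p.1, x) else p) (M, m)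
      = (t.foldl max M, t.foldl min m) := by
  induction t with
  | nil => intro M m _; rfl
  | cons y t ih =>
    intro M m hmM
    simp only [List.foldl_cons]
    split_ifs with h1 h2
    · rw [ih y m (by omega)]
      congr 1
      · congr 1; omega
      · congr 1; omega
    · rw [ih M y (by omega)]
      congr 1
      · congr 1; omega
      · congr 1; omega
    · rw [ih M m hmM]
      congr 1
      · congr 1; omega
      · congr 1; omega

-- A's whole loop over a nonempty list x :: t yields exactly (foldl max x, foldl min x)
theorem loop_extrema (x : Int) (t : List Int) :
    (x :: t).foldl (fun (p : Int × Int) z =>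
        if z > p.1 then (z, p.2) else if z < p.2 then (p.1, z) else p) (x, x)
      = (t.foldl max x, t.foldl min x) := by
  simp only [List.foldl_cons]
  have h0 : (if x > x then (x, x) else if x < x then (x, x) else (x, x)) = (x, x) := by
    simp
  rw [h0, step1_fold t x x le_rfl]

-- the first element of the identity-sort of x :: t is the running min foldl min x t
theorem sorted_head_eq_min (x : Int) (t : List Int) :
    PySem.List.pyGetD (PySem.List.sorted (x :: t) (fun y => y) false) 0 0 = t.foldl min x := by
  have hperm := PySem.List.sorted_perm (x :: t) (fun y : Int => y) false
  have hne : PySem.List.sorted (x :: t) (fun y : Int => y) false ≠ [] := by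
    intro h
    have := hperm.length_eq
    simp [h] at this
  obtain ⟨h, s, hs⟩ := List.exists_cons_of_ne_nil hne
  have hmin : PySem.List.min? (x :: t) (fun y : Int => y) = some (t.foldl min x) :=
    PySem.List.min?_id_cons x t
  have hmem_m : t.foldl min x ∈ (x :: t) := PySem.List.min?_mem hmin
  have hle_all : ∀ y ∈ (x :: t), t.foldl min x ≤ y := PySem.List.min?_isMin hmin
  have hh_le : ∀ y ∈ (x :: t), h ≤ y := PySem.List.key_head_sorted_le (x :: t) (fun y => y) hs
  have hh_mem : h ∈ (x :: t) := by
    have : h ∈ PySem.List.sorted (x :: t) (fun y : Int => y) false := by simp [hs]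
    exact (PySem.List.mem_sorted _ _ _ _).mp this
  have : h = t.foldl min x :=
    le_antisymm (hh_le _ hmem_m) (hle_all _ hh_mem)
  simp [hs, PySem.List.pyGetD_zero_cons, this]

-- the last element of the identity-sort of x :: t is the running max foldl max x t
theorem sorted_last_eq_max (x : Int) (t : List Int) :
    PySem.List.pyGetD (PySem.List.sorted (x :: t) (fun y => y) false) (-1) 0 = t.foldl max x := by
  set s := PySem.List.sorted (x :: t) (fun y : Int => y) false with hsdef
  have hperm := PySem.List.sorted_perm (x :: t) (fun y : Int => y) false
  have hne : s ≠ [] := by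
    intro h
    have := hperm.length_eq
    simp [hsdef ▸ h] at this
  have hpw : s.Pairwise (fun a b : Int => a ≤ b) := by
    simpa using PySem.List.sorted_pairwise (x :: t) (fun y : Int => y)
  have hlast_mem : s.getLast hne ∈ (x :: t) := hperm.mem_iff.mp (List.getLast_mem hne)
  have hmax : PySem.List.max? (x :: t) (fun y : Int => y) = some (t.foldl max x) :=
    PySem.List.max?_id_cons x t
  have hmem_m : t.foldl max x ∈ (x :: t) := PySem.List.max?_mem hmax
  have hge_all : ∀ y ∈ (x :: t), y ≤ t.foldl max x := PySem.List.max?_isMax hmax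
  -- every element of s is ≤ its last element, by Pairwise ≤
  have hlast_ge : ∀ y ∈ s, y ≤ s.getLast hne := by
    intro y hy
    obtain ⟨i, hi, rfl⟩ := List.getElem_of_mem hy
    rw [List.getLast_eq_getElem]
    rcases Nat.lt_or_ge i (s.length - 1) with hlt | hge
    · exact List.pairwise_iff_getElem.mp hpw i (s.length - 1) hi (by omega) hlt
    · have : i = s.length - 1 := by omega
      subst this; exact le_refl _
  have hm_in_s : t.foldl max x ∈ s := hperm.mem_iff.mpr hmem_m
  have heq : s.getLast hne = t.foldl max x :=
    le_antisymm (hge_all _ hlast_mem) (hlast_ge _ hm_in_s)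
  rw [PySem.List.pyGetD_neg_one s 0 hne, heq]

-- ===== VERDICT (by name: the statement is the Claim_ definition above) =====
theorem quick4_spec : Claim_equal_quick4 := by
  intro a b _ hpre
  obtain ⟨hlen, hne⟩ := hpre
  obtain ⟨x, ta, rfl⟩ := List.exists_cons_of_ne_nil hne
  have hbne : b ≠ [] := by
    intro h; subst h; simp at hlen
  obtain ⟨y, tb, rfl⟩ := List.exists_cons_of_ne_nil hbne
  show quick4 (x :: ta) (y :: tb) = quick4_alt (x :: ta) (y :: tb)
  unfold quick4 quick4_alt quick4step
  have hfold :
      (PySem.List.pyRange 0 (PySem.List.len (x :: ta)) 1).foldl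
        (fun s i => (if PySem.List.pyGetD (x :: ta) i 0 > s.1.1 then (PySem.List.pyGetD (x :: ta) i 0, s.1.2)
                     else if PySem.List.pyGetD (x :: ta) i 0 < s.1.2 then (s.1.1, PySem.List.pyGetD (x :: ta) i 0) else s.1,
                     if PySem.List.pyGetD (y :: tb) i 0 > s.2.1 then (PySem.List.pyGetD (y :: tb) i 0, s.2.2)
                     else if PySem.List.pyGetD (y :: tb) i 0 < s.2.2 then (s.2.1, PySem.List.pyGetD (y :: tb) i 0) else s.2))
        ((x, x), (y, y))
      = ((ta.foldl max x, ta.foldl min x), (tb.foldl max y, tb.foldl min y)) := by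
    rw [foldl_prod_split (PySem.List.pyRange 0 (PySem.List.len (x :: ta)) 1)
        (fun (p : Int × Int) i => if PySem.List.pyGetD (x :: ta) i 0 > p.1 then (PySem.List.pyGetD (x :: ta) i 0, p.2)
           else if PySem.List.pyGetD (x :: ta) i 0 < p.2 then (p.1, PySem.List.pyGetD (x :: ta) i 0) else p)
        (fun (q : Int × Int) i => if PySem.List.pyGetD (y :: tb) i 0 > q.1 then (PySem.List.pyGetD (y :: tb) i 0, q.2)
           else if PySem.List.pyGetD (y :: tb) i 0 < q.2 then (q.1, PySem.List.pyGetD (y :: tb) i 0) else q)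
        (x, x) (y, y)]
    rw [PySem.List.foldl_pyRange_zero_pyGetD (x :: ta) 0
        (fun (p : Int × Int) z => if z > p.1 then (z, p.2) else if z < p.2 then (p.1, z) else p) (x, x)]
    have hlen2 : PySem.List.len (x :: ta) = PySem.List.len (y :: tb) := by
      simp only [PySem.List.len_eq, hlen]
    rw [hlen2]
    rw [PySem.List.foldl_pyRange_zero_pyGetD (y :: tb) 0
        (fun (p : Int × Int) z => if z > p.1 then (z, p.2) else if z < p.2 then (p.1, z) else p) (y, y)]
    rw [loop_extrema x ta, loop_extrema y tb]
  have h0a : PySem.List.pyGetD (x :: ta) 0 0 = x := by simp [PySem.List.pyGetD]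
  have h0b : PySem.List.pyGetD (y :: tb) 0 0 = y := by simp [PySem.List.pyGetD]
  simp only [h0a, h0b, hfold, sorted_head_eq_min, sorted_last_eq_max]
  omega
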